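/- GENERATED by farm/mkstatement.py from design/units.tsv (unit `DGifSetupDecompress.2`) and the assertions of Gif/Spec/Seg_DGifSetupDecompress.lean — do not edit.
   THE STATEMENT of the proof unit `DGifSetupDecompress.2`: segment 2 of `DGifSetupDecompress` (45 instructions; entries 0x106205;
   exits 0x10632d; ranges 0x106205-0x1062e6)
   takes each of its entry assertions to one of its exit assertions (`Gif.Spec.DGifSetupDecompress.Seg2`), given the contracts of its callees.
   What the names mean: ProgX/Base/Spec/Basic.lean (the shared hypotheses), Gif/Spec/Seg_DGifSetupDecompress.lean (the assertions). The theorem to prove: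
   `theorem DGifSetupDecompress_2_ok : Gif.Spec.DGifSetupDecompress_2.Statement`. -/
import Gif.Code
import Gif.Dec.All
import Gif.Labels
import Gif.Spec.Seg_DGifSetupDecompress
namespace Gif.Spec.DGifSetupDecompress_2
open X86 X86.User Asan

/-- The statement of unit `DGifSetupDecompress.2`. -/
def Statement : Prop :=
  ∀ (Lay : Layout) (_hLay : Lay.hi = 0x1000000) (μ : Microarch) (_hμ : UserX.MicroOK μ) (u₀ : State)
    (_hcode : HasCodeNat Lay u₀ Gif.L.DGifSetupDecompress.entry Gif.Code.code_DGifSetupDecompress.nat Gif.L.DGifSetupDecompress.size)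
    (_h_asan_store1_noabort : Asan.SmallCheck Lay μ ProgX.Base.WayInv (ProgX.Base.CodeOK u₀) [.rax, .rdx] 1 ProgX.Base.L.__asan_store1_noabort.entry)
    (_h_asan_store4_noabort : Asan.SmallCheck Lay μ ProgX.Base.WayInv (ProgX.Base.CodeOK u₀) [.rax, .rcx, .rdx] 4 ProgX.Base.L.__asan_store4_noabort.entry)
    (_h_asan_store8_noabort : Asan.SmallCheck Lay μ ProgX.Base.WayInv (ProgX.Base.CodeOK u₀) [.rax, .rcx, .rdx] 8 ProgX.Base.L.__asan_store8_noabort.entry),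
    Gif.Spec.DGifSetupDecompress.Seg2 Lay μ u₀

end Gif.Spec.DGifSetupDecompress_2
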